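-- pv_equiv track=rewrite | github.com/nurillojumaboyev/Teacher-BRAILEE | bot.py | tarjima_oqish
-- ===== SOURCE A (Python) =====
-- kodlar = {
--      'A': '1', 'B': '1-2', 'D': '1-4-5', 'E': '1-5',
--     'F': '1-2-4', 'G': '1-2-4-5', 'H': '1-3-4-6', 'I': '2-4', 'J': '2-4-5',
--     'K': '1-3', 'L': '1-2-3', 'M': '1-3-4', 'N': '1-3-4-5', 'O': '1-3-5',
--     'P': '1-2-3-4', 'Q': '1-3-4-5-6', 'R': '1-2-3-5', 'S': '2-3-4', 'T': '2-3-4-5',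
--     'U': '1-2-6', 'V': '2-4-5-6', 'X': '1-2-5',
--     'Y': '1-2-3-4-6', 'Z': '1-3-5-6', "G'": '1-2-4-5-6', "CH": '1-2-3-4-5',
--     "SH": '1-5-6', "O'": '1-2-3-6', "NG": '1-3-4-5-1-2-4-5',
-- }
--
-- def tarjima_oqish(matn: str) -> str:
--     matn = matn.upper()
--     natija = []
--     i = 0
--     while i < len(matn):
--         if matn[i:i+2] in ["G'", "O'", "CH", "SH", "NG"]:
--             harf = matn[i:i+2]
--             i += 2
--         else:
--             harf = matn[i]
--             i += 1
--         if harf == ' ':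
--             natija.append('/')
--         elif harf in kodlar:
--             natija.append(kodlar[harf])
--         else:
--             natija.append('?')
--     return ', '.join(natija)
-- ===== SOURCE B (Python) =====
-- kodlar = {
--      'A': '1', 'B': '1-2', 'D': '1-4-5', 'E': '1-5',
--     'F': '1-2-4', 'G': '1-2-4-5', 'H': '1-3-4-6', 'I': '2-4', 'J': '2-4-5',
--     'K': '1-3', 'L': '1-2-3', 'M': '1-3-4', 'N': '1-3-4-5', 'O': '1-3-5',
--     'P': '1-2-3-4', 'Q': '1-3-4-5-6', 'R': '1-2-3-5', 'S': '2-3-4', 'T': '2-3-4-5',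
--     'U': '1-2-6', 'V': '2-4-5-6', 'X': '1-2-5',
--     'Y': '1-2-3-4-6', 'Z': '1-3-5-6', "G'": '1-2-4-5-6', "CH": '1-2-3-4-5',
--     "SH": '1-5-6', "O'": '1-2-3-6', "NG": '1-3-4-5-1-2-4-5',
-- }
--
-- _DIGRAFLAR = {"G'", "O'", "CH", "SH", "NG"}
-- _JADVAL = dict(kodlar)
-- _JADVAL[' '] = '/'
--
-- def tarjima_oqish(matn: str) -> str:
--     # tokenize with an explicit character stack, then map each token through one table
--     tokens = []
--     stack = list(matn.upper())
--     stack.reverse()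
--     while stack:
--         a = stack.pop()
--         if stack and a + stack[-1] in _DIGRAFLAR:
--             tokens.append(a + stack.pop())
--         else:
--             tokens.append(a)
--     return ', '.join(_JADVAL.get(t, '?') for t in tokens)
-- ===== Notes on version B (the rewrite author's own statement) =====
-- stated objective: idiomatic
-- what changed: Replaces the index-advancing while-loop that interleaves scanning and translation with a two-phase pipeline: a stack-based tokenizer that emits the token list (digraphs first), then a single merged lookup table (kodlar plus ' '->'/', default '?') mapped over the tokens and joined.
import Mathlib
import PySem

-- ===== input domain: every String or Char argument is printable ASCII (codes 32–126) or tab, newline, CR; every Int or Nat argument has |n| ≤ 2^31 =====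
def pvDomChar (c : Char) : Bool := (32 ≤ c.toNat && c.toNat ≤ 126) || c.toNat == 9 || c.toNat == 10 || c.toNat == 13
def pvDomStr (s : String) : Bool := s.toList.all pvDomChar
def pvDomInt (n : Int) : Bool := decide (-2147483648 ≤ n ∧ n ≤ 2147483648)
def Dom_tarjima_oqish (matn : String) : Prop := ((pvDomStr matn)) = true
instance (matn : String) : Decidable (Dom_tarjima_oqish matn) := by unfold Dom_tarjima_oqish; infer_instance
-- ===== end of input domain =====

-- B replaces A's index-advancing scan-and-translate loop by tokenize-then-map through one merged table (same cost; objective: idiomatic).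

-- ===== PORT A =====
def pvKodlar : PySem.Dict String String := PySem.Dict.ofList
  [("A", "1"), ("B", "1-2"), ("D", "1-4-5"), ("E", "1-5"),
   ("F", "1-2-4"), ("G", "1-2-4-5"), ("H", "1-3-4-6"), ("I", "2-4"), ("J", "2-4-5"),
   ("K", "1-3"), ("L", "1-2-3"), ("M", "1-3-4"), ("N", "1-3-4-5"), ("O", "1-3-5"),
   ("P", "1-2-3-4"), ("Q", "1-3-4-5-6"), ("R", "1-2-3-5"), ("S", "2-3-4"), ("T", "2-3-4-5"),
   ("U", "1-2-6"), ("V", "2-4-5-6"), ("X", "1-2-5"),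
   ("Y", "1-2-3-4-6"), ("Z", "1-3-5-6"), ("G'", "1-2-4-5-6"), ("CH", "1-2-3-4-5"),
   ("SH", "1-5-6"), ("O'", "1-2-3-6"), ("NG", "1-3-4-5-1-2-4-5")]

-- A's translation of one harf: ' '→'/', key→kodlar[harf] (getD under the contains guard equals kodlar[harf]; exact), else '?'
def pvTrA (harf : String) : String :=
  if harf == " " then "/"
  else if PySem.Dict.contains pvKodlar harf then PySem.Dict.getD pvKodlar harf "?"
  else "?"

-- A's while-loop: the remaining suffix of matn plays the role of index i; matn[i:i+2] = head :: (tail.take 1)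
def pvALoop : List Char → List String → List String
  | [], natija => natija
  | a :: rest, natija =>
      if (["G'", "O'", "CH", "SH", "NG"] : List String).contains (String.ofList (a :: rest.take 1)) then
        pvALoop (rest.drop 1) (natija ++ [pvTrA (String.ofList (a :: rest.take 1))])
      else
        pvALoop rest (natija ++ [pvTrA (String.ofList [a])])
  termination_by m _ => m.length
  decreasing_by
    all_goals simp

def tarjima_oqish (matn : String) : String :=
  PySem.Str.join ", " (pvALoop (PySem.Str.upper matn).toList [])

-- ===== PORT B =====
def pvDigraflar : PySem.Set String := PySem.Set.ofList ["G'", "O'", "CH", "SH", "NG"]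

def pvJadval : PySem.Dict String String := PySem.Dict.insert pvKodlar " " "/"

-- B's stack-based tokenizer: stack.pop() is taking the head of the remaining char list
def pvTokens : List Char → List String
  | [] => []
  | [a] => [(String.ofList [a])]
  | a :: b :: rest =>
      if PySem.Set.contains pvDigraflar (String.ofList [a, b]) then (String.ofList [a, b]) :: pvTokens rest
      else (String.ofList [a]) :: pvTokens (b :: rest)

def tarjima_oqish_alt (matn : String) : String :=
  PySem.Str.join ", " ((pvTokens (PySem.Str.upper matn).toList).map
    (fun t => PySem.Dict.getD pvJadval t "?"))

-- ===== PRECONDITION & SPEC =====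
def Spec_tarjima_oqish (matn : String) (out : String) : Prop := out = tarjima_oqish_alt matn
instance (matn : String) (out : String) : Decidable (Spec_tarjima_oqish matn out) := by unfold Spec_tarjima_oqish; infer_instance

-- ===== CLAIM (what is proved, stated in full; the proofs are below) =====
def Claim_equal_tarjima_oqish : Prop := ∀ (matn : String), Dom_tarjima_oqish matn → Spec_tarjima_oqish matn (tarjima_oqish matn)

-- ===== LEMMAS AND PROOFS =====

-- the two per-token translations agree on every string
theorem pv_tr_eq (s : String) : pvTrA s = PySem.Dict.getD pvJadval s "?" := by
  unfold pvTrA pvJadval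
  rw [PySem.Dict.getD_insert]
  by_cases h : s = " "
  · simp [h]
  · simp [h]
    intro hc
    rw [PySem.Dict.getD_of_not_contains _ _ hc]

theorem pv_dig_eq (t : String) :
    PySem.Set.contains pvDigraflar t = (["G'", "O'", "CH", "SH", "NG"] : List String).contains t := by
  rfl

theorem pv_loop_eq (cs : List Char) (natija : List String) :
    pvALoop cs natija = natija ++ (pvTokens cs).map (fun t => PySem.Dict.getD pvJadval t "?") := by
  induction cs using pvTokens.induct generalizing natija with
  | case1 => simp [pvALoop, pvTokens]
  | case2 a =>
      cases h : (["G'", "O'", "CH", "SH", "NG"] : List String).contains ((String.ofList [a]) : String) <;>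
        simp [pvALoop, pvTokens, pv_tr_eq]
  | case3 a b rest h ih =>
      rw [pv_dig_eq] at h
      simp only [pvALoop, pvTokens, List.take, List.drop, pv_dig_eq, h, if_true, ih]
      simp [pv_tr_eq]
  | case4 a b rest h ih =>
      rw [pv_dig_eq] at h
      simp only [pvALoop, pvTokens, List.take, List.drop, pv_dig_eq, h, ih]
      simp [pv_tr_eq]

-- ===== VERDICT (by name: the statement is the Claim_ definition above) =====
theorem tarjima_oqish_spec : Claim_equal_tarjima_oqish := by
  intro matn _
  unfold Spec_tarjima_oqish tarjima_oqish tarjima_oqish_alt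
  rw [pv_loop_eq]
  simp
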